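-- pv_equiv track=rewrite | github.com/TheDukeVin/AMP | conform/conform.py | please_flip_one_pass
-- ===== SOURCE A (Python) =====
-- def please_flip_one_pass(caps:list)->list:
--     """
--     Generates a minimal list of shouts by using exactly 1 for loop
--     Return a list of strings (ie. shouts)
--     """
--
--     shouts = []
--     if len(caps) == 0:
--         return shouts
--     lastCap = caps[0]
--     for i, cap in enumerate(caps + [caps[0]]):
--       if cap == lastCap:
--         continue
--       if cap != caps[0]:
--         start = i
--       else:
--         end = i-1
--         if start == end:
--             shouts.append(f"Person in position {str(start)} flip your cap!")
--         else:
--             shouts.append(f"People in positions {str(start)} through {str(end)} flip your caps!")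
--       lastCap = cap
--
--     return shouts
-- ===== SOURCE B (Python) =====
-- from itertools import groupby
--
--
-- def please_flip_one_pass(caps: list) -> list:
--     if not caps:
--         return []
--     first = caps[0]
--     # maximal equal-value runs as (value, start, end), plus a sentinel run
--     runs = []
--     i = 0
--     for v, g in groupby(caps):
--         n = len(list(g))
--         runs.append((v, i, i + n - 1))
--         i += n
--     runs.append((first, len(caps), len(caps)))
--     # shout for each run differing from first whose successor run returns to first
--     out = []
--     for (v, s, e), (w, _, _) in zip(runs, runs[1:]):
--         if v != first and w == first:
--             if s == e:
--                 out.append(f"Person in position {s} flip your cap!")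
--             else:
--                 out.append(f"People in positions {s} through {e} flip your caps!")
--     return out
-- ===== Notes on version B (the rewrite author's own statement) =====
-- stated objective: alternative
-- what changed: B replaces A's stateful single loop (lastCap/start trackers over caps+[caps[0]]) with a two-phase pipeline: build the maximal equal-value run list with itertools.groupby plus a sentinel run, then a pairwise scan over consecutive runs emits a shout for each non-first-value run followed by a return to the first value.
import Mathlib
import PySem

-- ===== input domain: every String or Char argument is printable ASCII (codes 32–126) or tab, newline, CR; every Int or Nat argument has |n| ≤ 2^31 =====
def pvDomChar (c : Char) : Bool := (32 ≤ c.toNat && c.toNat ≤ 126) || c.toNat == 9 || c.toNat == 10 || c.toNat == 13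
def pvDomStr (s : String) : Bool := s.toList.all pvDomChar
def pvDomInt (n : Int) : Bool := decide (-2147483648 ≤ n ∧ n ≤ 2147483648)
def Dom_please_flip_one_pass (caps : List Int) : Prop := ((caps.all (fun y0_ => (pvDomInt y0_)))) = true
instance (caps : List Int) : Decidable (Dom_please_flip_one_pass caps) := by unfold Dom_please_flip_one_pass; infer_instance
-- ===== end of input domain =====

-- ===== PORT A =====
-- B changes the algorithm: precomputed run list (groupby) + pairwise scan, instead of A's stateful single loop. Objective: alternative/simpler.
def shoutMsg (s e : Int) : String :=
  if s = e then "Person in position " ++ PySem.Int.toStr s ++ " flip your cap!"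
  else "People in positions " ++ PySem.Int.toStr s ++ " through " ++ PySem.Int.toStr e ++ " flip your caps!"

-- A's loop over enumerate(caps + [caps[0]]); state = (shouts, lastCap, start); end is i-1 at emission
def aLoop (h : Int) (i : Int) (xs : List Int) (shouts : List String) (lastCap start : Int) : List String :=
  match xs with
  | [] => shouts
  | cap :: rest =>
    if cap = lastCap then aLoop h (i+1) rest shouts lastCap start
    else if cap ≠ h then aLoop h (i+1) rest shouts cap i
    else aLoop h (i+1) rest (shouts ++ [shoutMsg start (i-1)]) cap start

def please_flip_one_pass (caps : List Int) : List String :=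
  match caps with
  | [] => []
  | c :: _ => aLoop c 0 (caps ++ [c]) [] c 0

-- ===== PORT B =====
-- itertools.groupby: maximal equal runs as (value, start, end)
def groupRuns (xs : List Int) (i : Int) : List (Int × Int × Int) :=
  match xs with
  | [] => []
  | x :: rest =>
    let k : Int := ((rest.takeWhile (fun y => y == x)).length : Int)
    (x, i, i + k) :: groupRuns (rest.dropWhile (fun y => y == x)) (i + k + 1)
termination_by xs.length
decreasing_by
  simp only [List.length_cons]
  exact Nat.lt_succ_of_le (List.length_dropWhile_le _ _)

-- pairwise scan over consecutive runs (zip(runs, runs[1:]))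
def emitRuns (h : Int) (rs : List (Int × Int × Int)) : List String :=
  match rs with
  | (v, s, e) :: r2 :: rest =>
      (if v ≠ h ∧ r2.1 = h then [shoutMsg s e] else []) ++ emitRuns h (r2 :: rest)
  | _ => []

def please_flip_one_pass_alt (caps : List Int) : List String :=
  match caps with
  | [] => []
  | c :: _ => emitRuns c (groupRuns caps 0 ++ [(c, (caps.length : Int), (caps.length : Int))])

-- ===== PRECONDITION & SPEC =====
def Spec_please_flip_one_pass (caps : List Int) (out : List String) : Prop := out = please_flip_one_pass_alt caps
instance (caps : List Int) (out : List String) : Decidable (Spec_please_flip_one_pass caps out) := by unfold Spec_please_flip_one_pass; infer_instance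

-- ===== CLAIM (what is proved, stated in full; the proofs are below) =====
def Claim_equal_please_flip_one_pass : Prop := ∀ (caps : List Int), Dom_please_flip_one_pass caps → Spec_please_flip_one_pass caps (please_flip_one_pass caps)

-- ===== LEMMAS AND PROOFS =====

theorem groupRuns_cons (x : Int) (rest : List Int) (i : Int) :
    groupRuns (x :: rest) i =
      (x, i, i + ((rest.takeWhile (fun y => y == x)).length : Int)) ::
        groupRuns (rest.dropWhile (fun y => y == x)) (i + ((rest.takeWhile (fun y => y == x)).length : Int) + 1) := by
  rw [groupRuns]

theorem emitRuns_cons_h (h a b : Int) (T : List (Int × Int × Int)) :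
    emitRuns h ((h, a, b) :: T) = emitRuns h T := by
  cases T with
  | nil => rfl
  | cons t tr => simp [emitRuns]

theorem emitRuns_cons_ne (h v st e y a b : Int) (T : List (Int × Int × Int)) (hy : y ≠ h) :
    emitRuns h ((v, st, e) :: ((y, a, b) :: T)) = emitRuns h ((y, a, b) :: T) := by
  simp [emitRuns, hy]

theorem emitRuns_cons_emit (h v st e a b : Int) (T : List (Int × Int × Int)) (hv : v ≠ h) :
    emitRuns h ((v, st, e) :: ((h, a, b) :: T)) = shoutMsg st e :: emitRuns h ((h, a, b) :: T) := by
  simp [emitRuns, hv]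

theorem aLoop_eq (h : Int) (ys : List Int) : ∀ (i v st : Int) (sh : List String),
    aLoop h i (ys ++ [h]) sh v st =
      sh ++ emitRuns h ((v, st, i + ((ys.takeWhile (fun y => y == v)).length : Int) - 1)
        :: (groupRuns (ys.dropWhile (fun y => y == v)) (i + ((ys.takeWhile (fun y => y == v)).length : Int))
        ++ [(h, i + (ys.length : Int), i + (ys.length : Int))])) := by
  induction ys with
  | nil =>
    intro i v st sh
    by_cases hv : h = v
    · subst hv
      simp [aLoop, emitRuns, groupRuns]
    · simp [aLoop, hv, Ne.symm hv, emitRuns, groupRuns]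
  | cons y ys ih =>
    intro i v st sh
    by_cases hyv : y = v
    · subst hyv
      have hb : (y == y) = true := beq_self_eq_true y
      have hlhs : aLoop h i ((y :: ys) ++ [h]) sh y st = aLoop h (i+1) (ys ++ [h]) sh y st := by
        simp [aLoop]
      rw [hlhs, ih]
      rw [List.takeWhile_cons, List.dropWhile_cons, hb]
      simp only [if_true, List.length_cons]
      have e1 : i + 1 + ((ys.takeWhile (fun z => z == y)).length : Int) - 1
          = i + (((ys.takeWhile (fun z => z == y)).length + 1 : Nat) : Int) - 1 := by
        push_cast; ring
      have e2 : i + 1 + ((ys.takeWhile (fun z => z == y)).length : Int)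
          = i + (((ys.takeWhile (fun z => z == y)).length + 1 : Nat) : Int) := by
        push_cast; ring
      have e3 : i + 1 + ((ys.length : Nat) : Int) = i + (((ys.length : Nat) + 1 : Nat) : Int) := by
        push_cast; ring
      rw [e1, e2, e3]
    · have hb : (y == v) = false := beq_eq_false_iff_ne.mpr hyv
      rw [show (y :: ys) ++ [h] = y :: (ys ++ [h]) from rfl]
      rw [List.takeWhile_cons, List.dropWhile_cons, hb]
      simp only [Bool.false_eq_true, if_false, List.length_nil, Nat.cast_zero, add_zero, List.length_cons]
      rw [groupRuns_cons, List.cons_append]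
      by_cases hyh : y = h
      · subst hyh
        have hvh : v ≠ y := fun hh => hyv hh.symm
        have hlhs : aLoop y i (y :: (ys ++ [y])) sh v st
            = aLoop y (i+1) (ys ++ [y]) (sh ++ [shoutMsg st (i-1)]) y st := by
          simp [aLoop, hyv]
        rw [hlhs, ih, emitRuns_cons_h]
        rw [emitRuns_cons_emit _ _ _ _ _ _ _ hvh, emitRuns_cons_h]
        have e1 : i + 1 + ((ys.takeWhile (fun z => z == y)).length : Int)
            = i + ((ys.takeWhile (fun z => z == y)).length : Int) + 1 := by ring
        have e2 : i + 1 + ((ys.length : Nat) : Int) = i + (((ys.length : Nat) + 1 : Nat) : Int) := by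
          push_cast; ring
        rw [e1, e2]
        simp
      · have hlhs : aLoop h i (y :: (ys ++ [h])) sh v st = aLoop h (i+1) (ys ++ [h]) sh y i := by
          simp [aLoop, hyv, hyh]
        rw [hlhs, ih]
        rw [emitRuns_cons_ne _ _ _ _ _ _ _ _ hyh]
        have e0 : i + 1 + ((ys.takeWhile (fun z => z == y)).length : Int) - 1
            = i + ((ys.takeWhile (fun z => z == y)).length : Int) := by ring
        have e1 : i + 1 + ((ys.takeWhile (fun z => z == y)).length : Int)
            = i + ((ys.takeWhile (fun z => z == y)).length : Int) + 1 := by ring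
        have e2 : i + 1 + ((ys.length : Nat) : Int) = i + (((ys.length : Nat) + 1 : Nat) : Int) := by
          push_cast; ring
        rw [e0, e1, e2]

-- ===== VERDICT (by name: the statement is the Claim_ definition above) =====
theorem please_flip_one_pass_spec : Claim_equal_please_flip_one_pass := by
  intro caps _
  unfold Spec_please_flip_one_pass
  cases caps with
  | nil => rfl
  | cons c t =>
    show aLoop c 0 ((c :: t) ++ [c]) [] c 0 = please_flip_one_pass_alt (c :: t)
    rw [aLoop_eq]
    have halt : please_flip_one_pass_alt (c :: t)
        = emitRuns c (groupRuns (c :: t) 0 ++ [(c, (((c :: t).length : Nat) : Int), (((c :: t).length : Nat) : Int))]) := rfl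
    rw [halt, groupRuns_cons, List.cons_append]
    have hb : (c == c) = true := beq_self_eq_true c
    rw [List.takeWhile_cons, List.dropWhile_cons, hb]
    simp only [if_true, List.length_cons, List.nil_append]
    have e1 : (0:Int) + (((t.takeWhile (fun z => z == c)).length + 1 : Nat) : Int) - 1
        = (0:Int) + ((t.takeWhile (fun z => z == c)).length : Int) := by
      push_cast; ring
    have e2 : (0:Int) + (((t.takeWhile (fun z => z == c)).length + 1 : Nat) : Int)
        = (0:Int) + ((t.takeWhile (fun z => z == c)).length : Int) + 1 := by
      push_cast; ring
    have e3 : (0:Int) + (((t.length : Nat) + 1 : Nat) : Int) = (((t.length + 1 : Nat)) : Int) := by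
      push_cast; ring
    rw [e1, e2, e3]
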